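-- pv_equiv track=rewrite | github.com/bicarlsen/pyscaps | pyscaps/model.py | split_problem_definition
-- ===== SOURCE A (Python) =====
-- def split_problem_definition( content ):
-- 	"""
-- 	Splits a problem definition into its components.
--
-- 	:param content: Problem definition content in the form of a list of strings.
-- 	:returns: List of problem definition sections as tuples of ( type, content ).
-- 	"""
-- 	section_keywords = [
-- 		'convergence',
-- 		'layer',
-- 		'interface properties',
-- 		'front contact',
-- 		'back contact'
-- 	]
--
-- 	if content[ 0 ] not in section_keywords:
-- 		raise ValueError( 'Content does not begin with a know section type.' )
--
-- 	sections = []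
-- 	section_header = None
-- 	section_content = None
--
-- 	for line in content:
-- 		if line in section_keywords:
-- 			# save previous section
-- 			sections.append( ( section_header, section_content ) )
--
-- 			# set new section
-- 			section_header = line
-- 			section_content = []
--
-- 		else:
-- 			section_content.append( line )
--
-- 	# save final section
-- 	sections.append( ( section_header, section_content ) )
--
-- 	# remove initial empty section
-- 	return sections[ 1: ]
-- ===== SOURCE B (Python) =====
-- def split_problem_definition(content):
-- 	"""
-- 	Splits a problem definition into its components.
--
-- 	:param content: Problem definition content in the form of a list of strings.
-- 	:returns: List of problem definition sections as tuples of ( type, content ).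
-- 	"""
-- 	section_keywords = [
-- 		'convergence',
-- 		'layer',
-- 		'interface properties',
-- 		'front contact',
-- 		'back contact'
-- 	]
--
-- 	if content[0] not in section_keywords:
-- 		raise ValueError('Content does not begin with a know section type.')
--
-- 	bounds = [i for i, line in enumerate(content) if line in section_keywords]
-- 	bounds.append(len(content))
-- 	return [
-- 		(content[b], content[b + 1:e])
-- 		for b, e in zip(bounds, bounds[1:])
-- 	]
-- ===== Notes on version B (the rewrite author's own statement) =====
-- stated objective: alternative
-- what changed: Replaces A's single-pass sentinel accumulator (None header, append-then-drop-first) with a boundaries-then-slice formulation: collect indices of keyword lines, append len(content) as sentinel, and slice the content between consecutive boundaries.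
import Mathlib
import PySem

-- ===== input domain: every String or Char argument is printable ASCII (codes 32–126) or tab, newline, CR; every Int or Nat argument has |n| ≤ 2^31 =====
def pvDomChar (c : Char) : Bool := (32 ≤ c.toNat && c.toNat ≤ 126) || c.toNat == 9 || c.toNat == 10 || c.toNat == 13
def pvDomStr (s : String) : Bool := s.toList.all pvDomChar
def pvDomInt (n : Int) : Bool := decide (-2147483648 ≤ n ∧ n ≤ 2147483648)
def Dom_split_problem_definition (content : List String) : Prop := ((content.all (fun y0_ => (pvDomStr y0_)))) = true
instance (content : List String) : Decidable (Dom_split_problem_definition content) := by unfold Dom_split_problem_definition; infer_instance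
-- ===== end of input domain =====

-- B replaces A's sentinel accumulation by boundary-index collection plus slicing (objective: alternative).

def sectionKeywords : List String :=
  ["convergence", "layer", "interface properties", "front contact", "back contact"]

-- ===== PORT A =====
-- Python's initial `section_header = None, section_content = None` is represented by ("", []);
-- under Pre_ the first line is a keyword, so the (None, None) pair is exactly the sections[0]
-- dropped by `sections[1:]` and is never observed.
-- the loop body of A's for-loop
def stepA (st : List (String × List String) × String × List String) (line : String) :
    List (String × List String) × String × List String :=
  if line ∈ sectionKeywords then
    (st.1 ++ [(st.2.1, st.2.2)], line, ([] : List String))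
  else
    (st.1, st.2.1, st.2.2 ++ [line])

def split_problem_definition (content : List String) : List (String × List String) :=
  let st := content.foldl stepA
    (([] : List (String × List String)), "", ([] : List String))
  (st.1 ++ [(st.2.1, st.2.2)]).drop 1

-- ===== PORT B =====
-- `content[b + 1:e]` is ported as drop/take: exact here since 0 ≤ b + 1 and e ≤ len(content).
def split_problem_definition_alt (content : List String) : List (String × List String) :=
  let bounds :=
    (content.zipIdx.filter (fun il => il.1 ∈ sectionKeywords)).map (·.2)
      ++ [content.length]
  (bounds.zip (bounds.drop 1)).map (fun be =>
    (content.getD be.1 "", (content.drop (be.1 + 1)).take (be.2 - (be.1 + 1))))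

-- ===== PRECONDITION & SPEC =====
-- Pre_ excludes exactly the inputs on which the Python A raises: the empty list (IndexError)
-- and lists whose first line is not a section keyword (ValueError). B raises identically there.
def Pre_split_problem_definition (content : List String) : Prop :=
  content ≠ [] ∧ content.getD 0 "" ∈ sectionKeywords
instance (content : List String) : Decidable (Pre_split_problem_definition content) := by
  unfold Pre_split_problem_definition; infer_instance

def pvWitness_split_problem_definition : List String :=
  ["layer", "thickness 1", "convergence", "back contact", "tol 2"]

def Spec_split_problem_definition (content : List String) (out : List (String × List String)) : Prop := out = split_problem_definition_alt content
instance (content : List String) (out : List (String × List String)) : Decidable (Spec_split_problem_definition content out) := by unfold Spec_split_problem_definition; infer_instance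

-- ===== CLAIM (what is proved, stated in full; the proofs are below) =====
def Claim_equal_split_problem_definition : Prop := ∀ (content : List String), Dom_split_problem_definition content → Pre_split_problem_definition content → Spec_split_problem_definition content (split_problem_definition content)

-- ===== LEMMAS AND PROOFS =====

-- Common reference shape: one section per leading line, body = following non-keyword lines.
def specSections : List String → List (String × List String)
  | [] => []
  | x :: xs =>
      (x, xs.takeWhile (fun l => !decide (l ∈ sectionKeywords)))
        :: specSections (xs.dropWhile (fun l => !decide (l ∈ sectionKeywords)))
termination_by l => l.length
decreasing_by
  simpa using Nat.lt_succ_of_le (List.length_dropWhile_le _ _)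

theorem specSections_nil : specSections [] = [] := by
  simp [specSections]

theorem specSections_cons (x : String) (xs : List String) :
    specSections (x :: xs) =
      (x, xs.takeWhile (fun l => !decide (l ∈ sectionKeywords)))
        :: specSections (xs.dropWhile (fun l => !decide (l ∈ sectionKeywords))) := by
  rw [specSections]

-- ---- A-side ----

theorem foldA_eq (ls : List String)
    (secs : List (String × List String)) (h : String) (b : List String) :
    (ls.foldl stepA (secs, h, b)).1 ++ [(ls.foldl stepA (secs, h, b)).2] =
    secs ++ (h, b ++ ls.takeWhile (fun l => !decide (l ∈ sectionKeywords)))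
        :: specSections (ls.dropWhile (fun l => !decide (l ∈ sectionKeywords))) := by
  induction ls generalizing secs h b with
  | nil => simp [specSections_nil]
  | cons x xs ih =>
      by_cases hx : x ∈ sectionKeywords
      · simp only [List.foldl_cons, stepA, if_pos hx]
        rw [ih]
        simp [hx, specSections_cons]
      · simp only [List.foldl_cons, stepA, if_neg hx]
        rw [ih]
        simp [hx]

-- ---- B-side ----

def boundIdx (content : List String) : List Nat :=
  (content.zipIdx.filter (fun il => il.1 ∈ sectionKeywords)).map (·.2)

theorem boundIdx_cons (x : String) (xs : List String) :
    boundIdx (x :: xs) =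
      (if x ∈ sectionKeywords then [0] else []) ++ (boundIdx xs).map (· + 1) := by
  by_cases hx : x ∈ sectionKeywords <;>
    simp [boundIdx, List.zipIdx_cons, List.zipIdx_succ, List.filter_map,
      Function.comp_def, List.map_map, hx]

theorem boundIdx_nonkw (t : List String)
    (ht : ∀ l ∈ t, l ∉ sectionKeywords) : boundIdx t = [] := by
  induction t with
  | nil => rfl
  | cons x xs ih =>
      rw [boundIdx_cons, ih (fun l hl => ht l (List.mem_cons_of_mem _ hl))]
      simp [ht x List.mem_cons_self]

theorem boundIdx_append (t r : List String) :
    boundIdx (t ++ r) = boundIdx t ++ (boundIdx r).map (· + t.length) := by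
  induction t with
  | nil => simp [boundIdx]
  | cons x xs ih =>
      simp [boundIdx_cons, ih, List.map_map, Function.comp_def, Nat.add_assoc]

def mkSections (content : List String) (bs : List Nat) : List (String × List String) :=
  (bs.zip (bs.drop 1)).map (fun be =>
    (content.getD be.1 "", (content.drop (be.1 + 1)).take (be.2 - (be.1 + 1))))

theorem alt_eq_mkSections (content : List String) :
    split_problem_definition_alt content =
      mkSections content (boundIdx content ++ [content.length]) := rfl

theorem mkSections_cons (c : List String) (a b : Nat) (l : List Nat) :
    mkSections c (a :: b :: l) =
      (c.getD a "", (c.drop (a + 1)).take (b - (a + 1))) :: mkSections c (b :: l) := rfl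

theorem mkSections_shift (pre r : List String) (bs : List Nat) :
    mkSections (pre ++ r) (bs.map (· + pre.length)) = mkSections r bs := by
  unfold mkSections
  rw [← List.map_drop, List.zip_map, List.map_map]
  refine List.map_congr_left ?_
  rintro ⟨b, e⟩ _
  simp only [Function.comp_def, Prod.map]
  have h1 : (pre ++ r).getD (b + pre.length) "" = r.getD b "" := by
    rw [List.getD_append_right pre r "" _ (Nat.le_add_left _ _), Nat.add_sub_cancel]
  have h2 : (pre ++ r).drop (b + pre.length + 1) = r.drop (b + 1) := by
    have h : b + pre.length + 1 = pre.length + (b + 1) := by omega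
    rw [h, List.drop_length_add_append]
  have h3 : e + pre.length - (b + pre.length + 1) = e - (b + 1) := by omega
  rw [h1, h2, h3]

theorem B_aux : ∀ (n : Nat) (content : List String), content.length ≤ n → content ≠ [] →
    content.getD 0 "" ∈ sectionKeywords →
    mkSections content (boundIdx content ++ [content.length]) = specSections content := by
  intro n
  induction n with
  | zero =>
      intro content hlen hne _
      cases content with
      | nil => exact absurd rfl hne
      | cons a l => simp at hlen
  | succ n ih =>
      intro content hlen hne hhd
      obtain ⟨c0, rest, rfl⟩ : ∃ c0 rest, content = c0 :: rest := by
        cases content with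
        | nil => exact absurd rfl hne
        | cons a l => exact ⟨a, l, rfl⟩
      have hhd0 : c0 ∈ sectionKeywords := by simpa using hhd
      have hrest : rest.takeWhile (fun l => !decide (l ∈ sectionKeywords))
          ++ rest.dropWhile (fun l => !decide (l ∈ sectionKeywords)) = rest :=
        List.takeWhile_append_dropWhile
      set t := rest.takeWhile (fun l => !decide (l ∈ sectionKeywords)) with ht
      set r := rest.dropWhile (fun l => !decide (l ∈ sectionKeywords)) with hr
      have hbt : boundIdx t = [] := by
        refine boundIdx_nonkw t (fun l hl => ?_)
        have h := List.mem_takeWhile_imp hl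
        simpa using h
      have hbrest : boundIdx rest = (boundIdx r).map (· + t.length) := by
        rw [← hrest, boundIdx_append, hbt, List.nil_append]
      have hb : boundIdx (c0 :: rest) = 0 :: (boundIdx r).map (· + (t.length + 1)) := by
        rw [boundIdx_cons, if_pos hhd0, hbrest, List.map_map]
        simp [Function.comp_def, Nat.add_assoc]
      have hlenc : (c0 :: rest).length = t.length + 1 + r.length := by
        have h := congrArg List.length hrest
        simp at h
        simp only [List.length_cons]
        omega
      rcases hr' : r with _ | ⟨r0, r'⟩
      · -- single section: rest = t
        have hrt : rest = t := by rw [← hrest, hr', List.append_nil]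
        have hbnil : boundIdx ([] : List String) = [] := rfl
        rw [hb, hr', hbnil]
        simp only [List.map_nil]
        rw [specSections_cons, ← ht, ← hr, hr', specSections_nil]
        simp [mkSections, ← hrt]
      · have hrne : r ≠ [] := by rw [hr']; simp
        have hdw : List.dropWhile (fun l => !decide (l ∈ sectionKeywords)) rest = r0 :: r' := by
          rw [← hr]; exact hr'
        have hr0 : r0 ∈ sectionKeywords := by
          have hne2 : List.dropWhile (fun l => !decide (l ∈ sectionKeywords)) rest ≠ [] := by
            rw [hdw]; simp
          have h := List.head_dropWhile_not (fun l => !decide (l ∈ sectionKeywords)) hne2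
          simp only [hdw, List.head_cons] at h
          simpa using h
        have hbr : boundIdx r = 0 :: (boundIdx r').map (· + 1) := by
          rw [hr', boundIdx_cons, if_pos hr0, List.singleton_append]
        have key : boundIdx (c0 :: rest) ++ [(c0 :: rest).length]
            = 0 :: (boundIdx r ++ [r.length]).map (· + (t.length + 1)) := by
          rw [hb, hlenc, List.map_append]
          simp [Nat.add_comm]
        have hbs' : boundIdx r ++ [r.length]
            = 0 :: ((boundIdx r').map (· + 1) ++ [r.length]) := by
          rw [hbr, List.cons_append]
        have hsplit : c0 :: rest = (c0 :: t) ++ r := by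
          rw [← hrest]; rfl
        rw [key, hbs']
        simp only [List.map_cons, Nat.zero_add]
        rw [mkSections_cons]
        have hfst : ((c0 :: rest).getD 0 "",
            ((c0 :: rest).drop (0 + 1)).take (t.length + 1 - (0 + 1))) = (c0, t) := by
          simp only [Nat.zero_add, Nat.add_sub_cancel, List.getD_cons_zero, List.drop_one,
            List.tail_cons]
          rw [← hrest, List.take_left]
        have hsnd : mkSections (c0 :: rest)
            ((t.length + 1) :: ((boundIdx r').map (· + 1) ++ [r.length]).map (· + (t.length + 1)))
            = specSections r := by
          have hml : ((t.length + 1) ::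
              ((boundIdx r').map (· + 1) ++ [r.length]).map (· + (t.length + 1)))
              = (boundIdx r ++ [r.length]).map (· + (c0 :: t).length) := by
            rw [hbs']
            simp
          rw [hml, hsplit, mkSections_shift]
          refine ih r ?_ hrne ?_
          · omega
          · rw [hr']; simpa using hr0
        rw [hfst, hsnd, specSections_cons, ← ht, ← hr]

theorem B_eq_spec (content : List String)
    (hne : content ≠ []) (hhd : content.getD 0 "" ∈ sectionKeywords) :
    mkSections content (boundIdx content ++ [content.length]) = specSections content :=
  B_aux content.length content le_rfl hne hhd

theorem A_eq_spec (content : List String)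
    (hne : content ≠ []) (hhd : content.getD 0 "" ∈ sectionKeywords) :
    split_problem_definition content = specSections content := by
  obtain ⟨c0, rest, rfl⟩ : ∃ c0 rest, content = c0 :: rest := by
    cases content with
    | nil => exact absurd rfl hne
    | cons a l => exact ⟨a, l, rfl⟩
  have hhd0 : c0 ∈ sectionKeywords := by simpa using hhd
  unfold split_problem_definition
  simp only [Prod.mk.eta]
  rw [foldA_eq]
  simp [hhd0, specSections_cons]

-- ===== VERDICT (by name: the statement is the Claim_ definition above) =====
theorem split_problem_definition_spec : Claim_equal_split_problem_definition := by
  intro content _ hpre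
  unfold Pre_split_problem_definition at hpre
  obtain ⟨hne, hhd⟩ := hpre
  unfold Spec_split_problem_definition
  rw [alt_eq_mkSections, B_eq_spec content hne hhd, A_eq_spec content hne hhd]
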